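-- pv_equiv track=rewrite | github.com/baozhiming/datastruecture | list/exchange/a.py | find
-- ===== SOURCE A (Python) =====
-- def find(string) -> str:
--     nums = []
--     for i in string:
--         if i not in nums:
--             nums.append(i)
--         else:
--             nums.remove(i)
--     return "".join(nums)
-- ===== SOURCE B (Python) =====
-- def find(string) -> str:
--     # Count occurrences in one pass, then a reverse pass picks each char's
--     # last occurrence; keep chars whose total count is odd, in order of
--     # last occurrence.
--     counts = {}
--     for c in string:
--         counts[c] = counts.get(c, 0) + 1
--     out = []
--     seen = set()
--     for c in reversed(string):
--         if c not in seen: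
--             seen.add(c)
--             if counts[c] % 2 == 1:
--                 out.append(c)
--     return "".join(reversed(out))
-- ===== Notes on version B (the rewrite author's own statement) =====
-- stated objective: alternative
-- what changed: Replaces A's toggle list with repeated membership tests and removals by one counting pass plus one reverse pass that emits each odd-count character at its last occurrence; A's worst case is O(n*k) in the number k of distinct chars, B is O(n), but with the small ASCII alphabet the measured cost is the same.
import Mathlib
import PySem

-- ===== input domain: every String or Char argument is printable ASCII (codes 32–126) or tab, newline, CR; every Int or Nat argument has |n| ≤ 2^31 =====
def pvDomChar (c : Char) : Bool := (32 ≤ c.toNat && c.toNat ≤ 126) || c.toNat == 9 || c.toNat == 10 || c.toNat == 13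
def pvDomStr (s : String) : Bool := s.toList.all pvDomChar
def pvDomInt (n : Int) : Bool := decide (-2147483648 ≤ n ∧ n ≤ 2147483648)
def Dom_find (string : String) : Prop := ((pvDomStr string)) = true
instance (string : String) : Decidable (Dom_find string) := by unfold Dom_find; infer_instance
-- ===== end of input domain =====

-- B replaces A's membership-toggle list by one counting pass plus one reverse
-- pass emitting each odd-count character at its last occurrence.

-- ===== PORT A =====
-- 'if i not in nums: nums.append(i) else: nums.remove(i)'
def findStep (nums : List Char) (i : Char) : List Char :=
  if ¬ nums.contains i then nums ++ [i]
  else match PySem.List.remove? nums i with   -- list.remove: in this branch i ∈ nums, so it returns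
       | some l => l                          -- the list with the first occurrence of i removed
       | none => nums                         -- unreachable (ValueError cannot happen here)

def find (string : String) : String :=
  String.mk (string.toList.foldl findStep [])   -- "".join of single chars = String.mk

-- ===== PORT B =====
def find_alt (string : String) : String :=
  let l := string.toList
  -- counts[c] = counts.get(c, 0) + 1
  let counts := l.foldl (fun d c => d.modify c 0 (· + 1)) PySem.Dict.empty
  -- counts[c] % 2 == 1  (Python %; counts are nonneg)
  let q : Char → Bool := fun c => PySem.Int.mod (counts.getD c 0) 2 == 1
  let st := l.reverse.foldl (fun (st : PySem.Set Char × List Char) c =>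
      if ¬ PySem.Set.contains st.1 c then
        (PySem.Set.add st.1 c, if q c then st.2 ++ [c] else st.2)
      else st) (PySem.Set.empty, [])
  String.mk st.2.reverse

-- ===== PRECONDITION & SPEC =====
def Spec_find (string : String) (out : String) : Prop := out = find_alt string
instance (string : String) (out : String) : Decidable (Spec_find string out) := by unfold Spec_find; infer_instance

-- ===== CLAIM (what is proved, stated in full; the proofs are below) =====
def Claim_equal_find : Prop := ∀ (string : String), Dom_find string → Spec_find string (find string)

-- ===== LEMMAS AND PROOFS =====

-- odd-count predicate on the full string
def oddCnt (l : List Char) (c : Char) : Bool := decide (l.count c % 2 = 1)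

theorem dedup_concat (l : List Char) (c : Char) :
    (l ++ [c]).dedup = l.dedup.erase c ++ [c] := by
  induction l with
  | nil => simp
  | cons a l ih =>
    by_cases hal : a ∈ l
    · rw [List.cons_append, List.dedup_cons_of_mem (by simp [hal]),
        List.dedup_cons_of_mem hal, ih]
    · by_cases hac : a = c
      · subst hac
        rw [List.cons_append, List.dedup_cons_of_mem (by simp),
          List.dedup_cons_of_notMem hal, ih, List.erase_cons_head,
          List.erase_of_not_mem (by simp [List.mem_dedup, hal])]
      · rw [List.cons_append, List.dedup_cons_of_notMem (by simp [hal, hac]),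
          List.dedup_cons_of_notMem hal, ih, List.erase_cons_tail (by simp [hac])]
        simp

theorem dedup_filter_ne (l : List Char) (c : Char) :
    (l.filter (fun b => b != c)).dedup = l.dedup.filter (fun b => b != c) := by
  induction l with
  | nil => simp
  | cons a l ih =>
    by_cases hac : a = c
    · subst hac
      by_cases hal : a ∈ l
      · rw [List.dedup_cons_of_mem hal]
        simpa using ih
      · rw [List.dedup_cons_of_notMem hal]
        simpa using ih
    · have hmem : (a ∈ l.filter (fun b => b != c)) ↔ a ∈ l := by
        simp [List.mem_filter, hac]
      by_cases hal : a ∈ l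
      · rw [List.filter_cons_of_pos (by simp [hac]),
          List.dedup_cons_of_mem (hmem.mpr hal), List.dedup_cons_of_mem hal, ih]
      · rw [List.filter_cons_of_pos (by simp [hac]),
          List.dedup_cons_of_notMem (fun h => hal (hmem.mp h)),
          List.dedup_cons_of_notMem hal, List.filter_cons_of_pos (by simp [hac]), ih]

theorem count_concat_self (l : List Char) (c : Char) :
    (l ++ [c]).count c = l.count c + 1 := by simp

theorem count_concat_ne (l : List Char) (c b : Char) (h : b ≠ c) :
    (l ++ [c]).count b = l.count b := by
  simp [List.count_append, Ne.symm h]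

-- A's fold computes: last occurrences (Mathlib dedup order) of odd-count chars
theorem afold_eq (l : List Char) :
    l.foldl findStep [] = l.dedup.filter (oddCnt l) := by
  induction l using List.reverseRecOn with
  | nil => simp
  | append_singleton l c ih =>
    rw [List.foldl_append, List.foldl_cons, List.foldl_nil, ih, dedup_concat]
    have hnodup : (l.dedup.filter (oddCnt l)).Nodup := l.nodup_dedup.filter _
    have hmemF : c ∈ l.dedup.filter (oddCnt l) ↔ oddCnt l c = true := by
      constructor
      · intro h; exact (List.mem_filter.mp h).2
      · intro h
        refine List.mem_filter.mpr ⟨List.mem_dedup.mpr ?_, h⟩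
        have : l.count c ≠ 0 := by
          intro h0; rw [oddCnt, h0] at h; simp at h
        exact List.count_pos_iff.mp (Nat.pos_of_ne_zero this)
    by_cases hc : oddCnt l c = true
    · -- c has odd count in l: it is removed
      have hmem : c ∈ l.dedup.filter (oddCnt l) := hmemF.mpr hc
      rw [findStep, if_neg (by simp [List.contains_eq_mem, hmem]),
        PySem.List.remove?_eq_some_erase _ c hmem]
      rw [hnodup.erase_eq_filter, List.filter_filter]
      rw [List.filter_append]
      have hc' : oddCnt (l ++ [c]) c = false := by
        have := count_concat_self l c
        simp only [oddCnt, this]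
        simp only [oddCnt, decide_eq_true_eq] at hc
        simp; omega
      rw [List.filter_singleton, hc']
      simp only [Bool.cond_false, List.append_nil]
      rw [l.nodup_dedup.erase_eq_filter, List.filter_filter]
      apply List.filter_congr
      intro b _
      by_cases hbc : b = c
      · subst hbc; simp
      · have := count_concat_ne l c b hbc
        simp [oddCnt, this, Bool.and_comm]
    · -- c has even count in l: it is appended
      have hmem : c ∉ l.dedup.filter (oddCnt l) := fun h => hc (hmemF.mp h)
      rw [findStep, if_pos (by simp [List.contains_eq_mem, hmem])]
      rw [List.filter_append]
      have hc' : oddCnt (l ++ [c]) c = true := by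
        have := count_concat_self l c
        simp only [oddCnt, this]
        simp only [oddCnt, decide_eq_true_eq] at hc
        simp; omega
      rw [List.filter_singleton, hc']
      simp only [Bool.cond_true]
      congr 1
      rw [l.nodup_dedup.erase_eq_filter, List.filter_filter]
      apply List.filter_congr
      intro b _
      by_cases hbc : b = c
      · subst hbc
        have hcf : oddCnt l b = false := by simpa using hc
        simp [hcf]
      · have := count_concat_ne l c b hbc
        simp [oddCnt, this, hbc, Bool.and_comm]

-- B's reverse loop, generalized over seen/out
theorem bloop_eq (q : Char → Bool) (xs : List Char) (seen : PySem.Set Char) (out : List Char) :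
    (xs.foldl (fun (st : PySem.Set Char × List Char) c =>
        if ¬ PySem.Set.contains st.1 c then
          (PySem.Set.add st.1 c, if q c then st.2 ++ [c] else st.2)
        else st) (seen, out)).2
    = out ++ (((xs.filter (fun b => !(seen.contains b))).reverse.dedup).reverse).filter q := by
  induction xs generalizing seen out with
  | nil => simp
  | cons c xs ih =>
    rw [List.foldl_cons]
    by_cases h : c ∈ seen
    · rw [if_neg (by simp [h])]
      rw [ih, List.filter_cons_of_neg (by simp [List.contains_eq_mem, h])]
    · rw [if_pos (by simp [h])]
      have hadd : PySem.Set.add seen c = seen ++ [c] := by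
        simp [PySem.Set.add, List.contains_eq_mem, h]
      rw [hadd, ih, List.filter_cons_of_pos (by simp [List.contains_eq_mem, h])]
      have hfilt : xs.filter (fun b => !((seen ++ [c] : List Char).contains b))
          = (xs.filter (fun b => !(seen.contains b))).filter (fun b => b != c) := by
        rw [List.filter_filter]
        apply List.filter_congr
        intro b _
        by_cases hbc : b = c <;> simp [List.contains_eq_mem, hbc]
      rw [hfilt]
      rw [← List.filter_reverse, dedup_filter_ne, List.reverse_cons, dedup_concat]
      rw [List.reverse_append, List.reverse_singleton, List.singleton_append,
        List.filter_cons]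
      have hnd : ((xs.filter (fun b => !(seen.contains b))).reverse.dedup).Nodup :=
        List.nodup_dedup _
      rw [hnd.erase_eq_filter]
      by_cases hq : q c = true
      · simp [hq]
      · simp at hq; simp [hq]

-- the counter fold gives counts
theorem counts_eq (l : List Char) (c : Char) :
    (l.foldl (fun d c => d.modify c 0 (· + 1)) PySem.Dict.empty).getD c 0 = (l.count c : Int) := by
  have : (l.foldl (fun d c => d.modify c 0 (· + 1)) PySem.Dict.empty) = PySem.Dict.counter l := by
    rw [PySem.Dict.counter_eq_foldl]
  rw [this, PySem.Dict.getD_counter]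

theorem q_eq_oddCnt (l : List Char) (c : Char) :
    (PySem.Int.mod ((l.foldl (fun d c => d.modify c 0 (· + 1)) PySem.Dict.empty).getD c 0) 2 == 1)
      = oddCnt l c := by
  have hm : PySem.Int.mod ((l.count c : Nat) : Int) 2 = ((l.count c % 2 : Nat) : Int) := by
    rw [PySem.Int.mod, Int.fmod_eq_emod]
    omega
  rw [counts_eq, hm]
  rcases Nat.mod_two_eq_zero_or_one (l.count c) with h | h <;> simp [oddCnt, h]

-- ===== VERDICT (by name: the statement is the Claim_ definition above) =====
theorem find_spec : Claim_equal_find := by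
  intro s _
  unfold Spec_find find find_alt
  dsimp only
  rw [afold_eq,
    bloop_eq (fun c => PySem.Int.mod
      ((s.toList.foldl (fun d c => d.modify c 0 (· + 1)) PySem.Dict.empty).getD c 0) 2 == 1)]
  have h1 : (s.toList.reverse.filter (fun b => !(PySem.Set.contains PySem.Set.empty b)))
      = s.toList.reverse := by
    apply List.filter_eq_self.mpr
    intro b _; simp [PySem.Set.contains, PySem.Set.empty]
  rw [h1, List.reverse_reverse, List.nil_append, ← List.filter_reverse, List.reverse_reverse]
  congr 1
  apply List.filter_congr
  intro b _
  exact (q_eq_oddCnt s.toList b).symm
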